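-- pv_equiv track=rewrite | github.com/Nurali017/qfl-backend | app/services/default_season.py | pick_default_season
-- ===== SOURCE A (Python) =====
-- from typing import Iterable
--
-- TOURNAMENT_PRIORITY: dict[str, int] = {
--     "pl": 0,
--     "1l": 1,
--     "2l": 2,
--     "el": 3,
--     "cup": 4,
-- }
--
-- _UNKNOWN_PRIORITY = len(TOURNAMENT_PRIORITY)
--
-- def _priority(frontend_code: str | None) -> int:
--     if frontend_code is None:
--         return _UNKNOWN_PRIORITY
--     return TOURNAMENT_PRIORITY.get(frontend_code, _UNKNOWN_PRIORITY)
--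
-- def pick_default_season(
--     entries: Iterable[tuple[int, int | None, str | None]],
-- ) -> int | None:
--     """Pick the default season for a player or team.
--
--     Priority: newest season_year first, then tournament priority
--     (pl > 1l > 2l > el > cup, unknown codes last), tie-break by season_id desc.
--
--     Args:
--         entries: iterable of (season_id, season_year, frontend_code) tuples.
--     Returns:
--         Winning season_id, or None if entries is empty.
--     """
--     best: tuple[int, int, int] | None = None  # (-year, priority, -id)
--     best_id: int | None = None
--     for season_id, year, code in entries:
--         year_key = -(year if year is not None else -10_000)
--         key = (year_key, _priority(code), -season_id)
--         if best is None or key < best: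
--             best = key
--             best_id = season_id
--     return best_id
-- ===== SOURCE B (Python) =====
-- from typing import Iterable
--
-- TOURNAMENT_PRIORITY: dict[str, int] = {
--     "pl": 0,
--     "1l": 1,
--     "2l": 2,
--     "el": 3,
--     "cup": 4,
-- }
--
-- _UNKNOWN_PRIORITY = len(TOURNAMENT_PRIORITY)
--
-- def _priority(frontend_code):
--     if frontend_code is None:
--         return _UNKNOWN_PRIORITY
--     return TOURNAMENT_PRIORITY.get(frontend_code, _UNKNOWN_PRIORITY)
--
-- def pick_default_season(entries):
--     ordered = sorted(
--         entries,
--         key=lambda e: (-(e[1] if e[1] is not None else -10_000), _priority(e[2]), -e[0]),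
--     )
--     return ordered[0][0] if ordered else None
-- ===== Notes on version B (the rewrite author's own statement) =====
-- stated objective: alternative
-- what changed: Replaces the running-best single pass (manual argmin with an Option accumulator) by a sort-then-take-front strategy: fully sort the entries by the same composite key and return the first element's season_id.
import Mathlib
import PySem

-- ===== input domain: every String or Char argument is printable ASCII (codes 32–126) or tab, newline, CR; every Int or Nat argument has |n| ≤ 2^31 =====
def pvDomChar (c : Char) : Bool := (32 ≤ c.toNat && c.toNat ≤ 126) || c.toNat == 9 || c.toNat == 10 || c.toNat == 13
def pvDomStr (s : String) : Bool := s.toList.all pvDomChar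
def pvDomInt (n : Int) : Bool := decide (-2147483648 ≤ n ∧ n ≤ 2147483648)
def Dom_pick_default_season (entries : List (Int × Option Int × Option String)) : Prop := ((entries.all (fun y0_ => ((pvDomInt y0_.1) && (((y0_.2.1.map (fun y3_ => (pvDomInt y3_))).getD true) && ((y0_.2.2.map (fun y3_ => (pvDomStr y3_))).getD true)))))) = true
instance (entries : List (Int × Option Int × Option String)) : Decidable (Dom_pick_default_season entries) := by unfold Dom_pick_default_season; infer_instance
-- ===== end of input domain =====

-- B replaces A's running-best single pass by a full stable sort on the same composite key
-- followed by taking the front element (objective: alternative decomposition, not faster).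

-- ===== PORT A =====
def pdsTournamentPriorityA : PySem.Dict String Int :=
  ((((PySem.Dict.empty.insert "pl" 0).insert "1l" 1).insert "2l" 2).insert "el" 3).insert "cup" 4

-- _UNKNOWN_PRIORITY = len(TOURNAMENT_PRIORITY) = 5
def pdsUnknownPriorityA : Int := 5

def pdsPriorityA (frontend_code : Option String) : Int :=
  match frontend_code with
  | none => pdsUnknownPriorityA
  | some c => pdsTournamentPriorityA.getD c pdsUnknownPriorityA

-- Python's `<` on int 3-tuples, exactly (lexicographic)
def pdsKeyLt (a b : Int × Int × Int) : Bool :=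
  a.1 < b.1 || (a.1 == b.1 && (a.2.1 < b.2.1 || (a.2.1 == b.2.1 && a.2.2 < b.2.2)))

def pick_default_season (entries : List (Int × Option Int × Option String)) : Option Int :=
  (entries.foldl
    (fun (st : Option (Int × Int × Int) × Option Int) e =>
      let yearKey : Int := -(match e.2.1 with | some y => y | none => -10000)
      let key : Int × Int × Int := (yearKey, pdsPriorityA e.2.2, -e.1)
      match st.1 with
      | none => (some key, some e.1)
      | some b => if pdsKeyLt key b then (some key, some e.1) else st)
    (none, none)).2

-- ===== PORT B =====
-- Source B uses the same module-level TOURNAMENT_PRIORITY/_priority helper as A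
-- the lambda key of Source B; lexicographic tuple order via Prod.Lex
def pdsKeyB (e : Int × Option Int × Option String) : Int ×ₗ Int ×ₗ Int :=
  toLex (-(e.2.1.getD (-10000)), toLex (pdsPriorityA e.2.2, -e.1))

def pick_default_season_alt (entries : List (Int × Option Int × Option String)) : Option Int :=
  match PySem.List.sorted entries pdsKeyB with
  | [] => none
  | e :: _ => some e.1

-- ===== PRECONDITION & SPEC =====
def Spec_pick_default_season (entries : List (Int × Option Int × Option String)) (out : Option Int) : Prop := out = pick_default_season_alt entries
instance (entries : List (Int × Option Int × Option String)) (out : Option Int) : Decidable (Spec_pick_default_season entries out) := by unfold Spec_pick_default_season; infer_instance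

-- ===== CLAIM (what is proved, stated in full; the proofs are below) =====
def Claim_equal_pick_default_season : Prop := ∀ (entries : List (Int × Option Int × Option String)), Dom_pick_default_season entries → Spec_pick_default_season entries (pick_default_season entries)

-- ===== LEMMAS AND PROOFS =====

-- A's key of an entry, as a plain triple
def pdsKOf (e : Int × Option Int × Option String) : Int × Int × Int :=
  (-(match e.2.1 with | some y => y | none => -10000), pdsPriorityA e.2.2, -e.1)

-- embed the plain triple into the lex order
def pdsL (k : Int × Int × Int) : Int ×ₗ Int ×ₗ Int := toLex (k.1, toLex (k.2.1, k.2.2))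

lemma pdsKeyB_eq (e : Int × Option Int × Option String) : pdsKeyB e = pdsL (pdsKOf e) := by
  cases e with
  | mk i r =>
    cases r with
    | mk y c =>
      cases y <;> cases c <;> rfl

lemma pdsL_inj {a b : Int × Int × Int} (h : pdsL a = pdsL b) : a = b := by
  obtain ⟨a1, a2, a3⟩ := a; obtain ⟨b1, b2, b3⟩ := b
  simpa [pdsL, Prod.ext_iff] using h

lemma pdsKeyLt_iff (a b : Int × Int × Int) : pdsKeyLt a b = true ↔ pdsL a < pdsL b := by
  simp [pdsKeyLt, pdsL, Prod.Lex.toLex_lt_toLex]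

-- A's running best over the tail, starting from key k
def pdsMinFold (k : Int × Int × Int) (l : List (Int × Option Int × Option String)) : Int × Int × Int :=
  l.foldl (fun acc e => if pdsKeyLt (pdsKOf e) acc then pdsKOf e else acc) k

lemma pdsMinFold_mem (k : Int × Int × Int) (l : List (Int × Option Int × Option String)) :
    pdsMinFold k l = k ∨ ∃ e ∈ l, pdsMinFold k l = pdsKOf e := by
  induction l generalizing k with
  | nil => exact Or.inl rfl
  | cons e t ih =>
    simp only [pdsMinFold, List.foldl_cons]
    by_cases h : pdsKeyLt (pdsKOf e) k = true
    · rw [if_pos h]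
      rcases ih (pdsKOf e) with h1 | ⟨e', he', h2⟩
      · exact Or.inr ⟨e, by simp, h1⟩
      · exact Or.inr ⟨e', by simp [he'], h2⟩
    · rw [if_neg h]
      rcases ih k with h1 | ⟨e', he', h2⟩
      · exact Or.inl h1
      · exact Or.inr ⟨e', by simp [he'], h2⟩

lemma pdsMinFold_le (k : Int × Int × Int) (l : List (Int × Option Int × Option String)) :
    pdsL (pdsMinFold k l) ≤ pdsL k ∧ ∀ e ∈ l, pdsL (pdsMinFold k l) ≤ pdsL (pdsKOf e) := by
  induction l generalizing k with
  | nil => exact ⟨le_refl _, by simp⟩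
  | cons e t ih =>
    simp only [pdsMinFold, List.foldl_cons]
    by_cases h : pdsKeyLt (pdsKOf e) k = true
    · rw [if_pos h]
      obtain ⟨h1, h2⟩ := ih (pdsKOf e)
      refine ⟨le_trans h1 (le_of_lt ((pdsKeyLt_iff _ _).mp h)), ?_⟩
      intro e' he'
      rcases List.mem_cons.mp he' with rfl | he'
      · exact h1
      · exact h2 e' he'
    · rw [if_neg h]
      obtain ⟨h1, h2⟩ := ih k
      refine ⟨h1, ?_⟩
      intro e' he'
      rcases List.mem_cons.mp he' with rfl | he'
      · have : ¬ pdsL (pdsKOf e') < pdsL k := by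
          rw [← pdsKeyLt_iff]; simpa using h
        exact le_trans h1 (not_lt.mp this)
      · exact h2 e' he'

-- A's fold, once the best is set, computes the running min of keys (the id is -key.2.2)
lemma pdsFoldA (l : List (Int × Option Int × Option String)) (b : Int × Int × Int) (i : Int)
    (hi : i = -b.2.2) :
    l.foldl
      (fun (st : Option (Int × Int × Int) × Option Int) e =>
        let yearKey : Int := -(match e.2.1 with | some y => y | none => -10000)
        let key : Int × Int × Int := (yearKey, pdsPriorityA e.2.2, -e.1)
        match st.1 with
        | none => (some key, some e.1)
        | some b => if pdsKeyLt key b then (some key, some e.1) else st)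
      (some b, some i)
    = (some (pdsMinFold b l), some (-(pdsMinFold b l).2.2)) := by
  induction l generalizing b i with
  | nil => simp [pdsMinFold, hi]
  | cons e t ih =>
    simp only [List.foldl_cons, pdsMinFold, List.foldl_cons]
    have hk : pdsKOf e = (-(match e.2.1 with | some y => y | none => -10000), pdsPriorityA e.2.2, -e.1) := rfl
    by_cases h : pdsKeyLt (pdsKOf e) b = true
    · rw [← hk]
      simp only [h, if_true]
      exact ih (pdsKOf e) e.1 (by simp [pdsKOf])
    · rw [← hk]
      simp only [h, if_false]
      exact ih b i hi

lemma pdsA_cons (e : Int × Option Int × Option String) (l : List (Int × Option Int × Option String)) :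
    pick_default_season (e :: l) = some (-(pdsMinFold (pdsKOf e) l).2.2) := by
  unfold pick_default_season
  rw [List.foldl_cons]
  exact congrArg Prod.snd (pdsFoldA l (pdsKOf e) e.1 (by simp [pdsKOf]))

-- ===== VERDICT (by name: the statement is the Claim_ definition above) =====
theorem pick_default_season_spec : Claim_equal_pick_default_season := by
  intro entries _
  unfold Spec_pick_default_season
  cases hs : PySem.List.sorted entries pdsKeyB with
  | nil =>
    have : entries = [] := (PySem.List.sorted_eq_nil_iff _ _ _).mp hs
    subst this
    rfl
  | cons h t =>
    have hne : entries ≠ [] := by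
      intro he
      have h0 := (PySem.List.sorted_eq_nil_iff entries pdsKeyB false).mpr he
      rw [hs] at h0; cases h0
    obtain ⟨e, l, rfl⟩ := List.exists_cons_of_ne_nil hne
    set m := pdsMinFold (pdsKOf e) l with hm
    -- head of the sorted list is key-minimal
    have hmin : ∀ y ∈ e :: l, pdsKeyB h ≤ pdsKeyB y :=
      PySem.List.key_head_sorted_le (e :: l) pdsKeyB hs
    have hmem : h ∈ e :: l := by
      have : h ∈ PySem.List.sorted (e :: l) pdsKeyB := by rw [hs]; simp
      exact (PySem.List.mem_sorted _ _ _ _).mp this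
    -- m is key-minimal too, and is the key of some entry
    obtain ⟨hle, hall⟩ := pdsMinFold_le (pdsKOf e) l
    have hmle : pdsL m ≤ pdsL (pdsKOf h) := by
      rcases List.mem_cons.mp hmem with rfl | hh
      · exact hle
      · exact hall h hh
    have hlem : pdsL (pdsKOf h) ≤ pdsL m := by
      rcases pdsMinFold_mem (pdsKOf e) l with h1 | ⟨e', he', h2⟩
      · rw [hm, h1]
        have := hmin e (by simp)
        rwa [pdsKeyB_eq, pdsKeyB_eq] at this
      · rw [hm, h2]
        have := hmin e' (by simp [he'])
        rwa [pdsKeyB_eq, pdsKeyB_eq] at this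
    have hkeq : pdsKOf h = m := pdsL_inj (le_antisymm hlem hmle)
    have hh1 : h.1 = -m.2.2 := by
      rw [← hkeq]; simp [pdsKOf]
    rw [pdsA_cons]
    simp only [pick_default_season_alt, hs, hh1, ← hm]
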